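-- pv_equiv track=rewrite | github.com/qqqqqqh1/Python | 6. Списки/Задачи/Матрицы/Судоку.py | row_correct
-- ===== SOURCE A (Python) =====
-- def row_correct(sudoku, n):
--   seen = set()
--   for col in range(n**2):
--     num = sudoku[0][col]
--     if num in seen:
--       return False
--     seen.add(num)
--   for i in range(1, n**2 + 1):
--     if i not in seen:
--       return False
--   return True
-- ===== SOURCE B (Python) =====
-- def row_correct(sudoku, n):
--     row = [sudoku[0][col] for col in range(n ** 2)]
--     return sorted(row) == list(range(1, n ** 2 + 1))
-- ===== Notes on version B (the rewrite author's own statement) =====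
-- stated objective: simpler
-- what changed: Replaces the duplicate-tracking set plus the 1..n^2 coverage loop by materialising the first n^2 cells of row 0, sorting them and comparing with list(range(1, n^2+1)).
-- outside the precondition, e.g. on row_correct([[1, 1]], 2): A returns False, B raises IndexError
import Mathlib
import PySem

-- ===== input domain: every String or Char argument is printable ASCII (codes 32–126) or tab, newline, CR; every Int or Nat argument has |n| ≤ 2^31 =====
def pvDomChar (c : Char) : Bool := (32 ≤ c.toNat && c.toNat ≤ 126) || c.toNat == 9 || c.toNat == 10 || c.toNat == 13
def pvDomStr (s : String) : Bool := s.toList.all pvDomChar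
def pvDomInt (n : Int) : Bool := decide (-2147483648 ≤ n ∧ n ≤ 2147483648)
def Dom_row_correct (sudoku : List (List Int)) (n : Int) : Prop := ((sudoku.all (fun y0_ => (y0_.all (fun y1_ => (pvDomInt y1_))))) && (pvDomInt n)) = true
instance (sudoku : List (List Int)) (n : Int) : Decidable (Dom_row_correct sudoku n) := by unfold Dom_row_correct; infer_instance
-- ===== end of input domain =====

-- B replaces A's seen-set + coverage loop by sorting the first n^2 cells of row 0 and
-- comparing with list(range(1, n^2+1)) (objective: simpler).

-- ===== PORT A =====
-- first loop of A: 'for col in range(n**2)' as a counted loop (fuel = iterations left,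
-- c = current col, as lazy as Python's range): look the cell up, stop on a duplicate
-- (none = IndexError on the lookup)
def aScan (sudoku : List (List Int)) : Nat → Int → PySem.Set Int → Option (Bool × PySem.Set Int)
  | 0, _, seen => some (true, seen)
  | k + 1, c, seen =>
    match (PySem.List.pyGet? sudoku 0).bind (fun row => PySem.List.pyGet? row c) with
    | none => none
    | some num =>
      if PySem.Set.contains seen num then some (false, seen)
      else aScan sudoku k (c + 1) (PySem.Set.add seen num)

-- second loop of A: every i of the range must be in seen
def aCheck (seen : PySem.Set Int) : List Int → Bool
  | [] => true
  | i :: is => if PySem.Set.contains seen i then aCheck seen is else false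

def row_correct (sudoku : List (List Int)) (n : Int) : Bool :=
  match aScan sudoku (n ^ 2).toNat 0 PySem.Set.empty with
  | none => false
  | some (false, _) => false
  | some (true, seen) => aCheck seen (PySem.List.pyRange 1 (n ^ 2 + 1))

-- ===== PORT B =====
-- the list comprehension [sudoku[0][col] for col in range(n**2)] as a counted loop
-- (lazy like Python's range; none = IndexError)
def bRow (sudoku : List (List Int)) : Nat → Int → Option (List Int)
  | 0, _ => some []
  | k + 1, c =>
    match (PySem.List.pyGet? sudoku 0).bind (fun row => PySem.List.pyGet? row c) with
    | none => none
    | some v => (bRow sudoku k (c + 1)).map (fun vs => v :: vs)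

def row_correct_alt (sudoku : List (List Int)) (n : Int) : Bool :=
  match bRow sudoku (n ^ 2).toNat 0 with
  | none => false
  | some row => decide (PySem.List.sorted row (fun x => x) = PySem.List.pyRange 1 (n ^ 2 + 1))

-- ===== PRECONDITION & SPEC =====
-- Pre_ excludes exactly the inputs on which B's comprehension hits an IndexError (n^2 > 0 and
-- row 0 missing or shorter than n^2); there A either raises the same IndexError or, when a
-- duplicate occurs before the short row runs out, returns False while B raises.
def Pre_row_correct (sudoku : List (List Int)) (n : Int) : Prop :=
  n ^ 2 = 0 ∨ (sudoku ≠ [] ∧ n ^ 2 ≤ (sudoku.headI.length : Int))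
instance (sudoku : List (List Int)) (n : Int) : Decidable (Pre_row_correct sudoku n) := by
  unfold Pre_row_correct; infer_instance

def pvWitness_row_correct : List (List Int) × Int := ([[2, 1, 4, 3]], 2)

def Spec_row_correct (sudoku : List (List Int)) (n : Int) (out : Bool) : Prop := out = row_correct_alt sudoku n
instance (sudoku : List (List Int)) (n : Int) (out : Bool) : Decidable (Spec_row_correct sudoku n out) := by unfold Spec_row_correct; infer_instance

-- ===== CLAIM (what is proved, stated in full; the proofs are below) =====
def Claim_equal_row_correct : Prop := ∀ (sudoku : List (List Int)) (n : Int), Dom_row_correct sudoku n → Pre_row_correct sudoku n → Spec_row_correct sudoku n (row_correct sudoku n)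

-- ===== LEMMAS AND PROOFS =====

-- value-level version of A's first loop (the lookups already performed)
def scanV : List Int → PySem.Set Int → Bool × PySem.Set Int
  | [], seen => (true, seen)
  | v :: vs, seen =>
    if PySem.Set.contains seen v then (false, seen) else scanV vs (PySem.Set.add seen v)

lemma scanV_fst_true_iff : ∀ (V : List Int) (seen : PySem.Set Int),
    (scanV V seen).1 = true ↔ V.Nodup ∧ ∀ v ∈ V, v ∉ seen := by
  intro V
  induction V with
  | nil => intro seen; simp [scanV]
  | cons v vs ih =>
    intro seen
    simp only [scanV, PySem.Set.contains_iff]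
    by_cases h : v ∈ seen
    · simp [h]
    · rw [if_neg h, ih]
      have hv : v ∉ seen := h
      constructor
      · rintro ⟨hnd, hall⟩
        refine ⟨List.nodup_cons.mpr ⟨fun hmem => ?_, hnd⟩, ?_⟩
        · exact (hall v hmem) ((PySem.Set.mem_add seen v v).mpr (Or.inr rfl))
        · intro x hx
          rcases List.mem_cons.mp hx with rfl | hx
          · exact hv
          · intro hmem
            exact hall x hx ((PySem.Set.mem_add seen v x).mpr (Or.inl hmem))
      · rintro ⟨hnd, hall⟩
        rcases List.nodup_cons.mp hnd with ⟨hvn, hnd'⟩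
        refine ⟨hnd', fun x hx hmem => ?_⟩
        rcases (PySem.Set.mem_add seen v x).mp hmem with hm | rfl
        · exact hall x (List.mem_cons_of_mem _ hx) hm
        · exact hvn hx

lemma scanV_snd_mem : ∀ (V : List Int) (seen : PySem.Set Int),
    (scanV V seen).1 = true → ∀ x, (x ∈ (scanV V seen).2 ↔ x ∈ seen ∨ x ∈ V) := by
  intro V
  induction V with
  | nil => intro seen _ x; simp [scanV]
  | cons v vs ih =>
    intro seen htrue x
    simp only [scanV, PySem.Set.contains_iff] at htrue ⊢
    by_cases h : v ∈ seen
    · simp [h] at htrue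
    · rw [if_neg h] at htrue ⊢
      rw [ih _ htrue x, PySem.Set.mem_add]
      simp [List.mem_cons]
      tauto

lemma aCheck_true_iff : ∀ (L : List Int) (seen : PySem.Set Int),
    aCheck seen L = true ↔ ∀ i ∈ L, i ∈ seen := by
  intro L
  induction L with
  | nil => intro seen; simp [aCheck]
  | cons i is ih =>
    intro seen
    simp only [aCheck, PySem.Set.contains_iff]
    by_cases h : i ∈ seen
    · simp [h, ih]
    · simp [h]

-- A's loops over range(a, a+k) on a long-enough first row = the value-level loops
lemma aScan_range (r : List Int) (rest : List (List Int)) :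
    ∀ (k : Nat) (a : Int) (seen : PySem.Set Int), 0 ≤ a → a + k ≤ (r.length : Int) →
      aScan (r :: rest) k a seen
        = some (scanV ((PySem.List.pyRange a (a + k)).map
            (fun c => (PySem.List.pyGet? r c).getD 0)) seen) := by
  intro k
  induction k with
  | zero =>
    intro a seen _ _
    rw [PySem.List.pyRange_one_eq_nil (by omega)]
    simp [aScan, scanV]
  | succ k ih =>
    intro a seen ha hlen
    have hcons := PySem.List.pyRange_one_cons (a := a) (b := a + (k + 1 : Nat)) (by push_cast; omega)
    rw [hcons]
    have h0 : PySem.List.pyGet? (r :: rest) 0 = some r := by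
      simp
    have hget : PySem.List.pyGet? r a = some (r[a.toNat]'(by push_cast at hlen; omega)) := by
      have := PySem.List.pyGet?_natCast r a.toNat
      rw [Int.toNat_of_nonneg ha] at this
      rw [this, List.getElem?_eq_getElem]
    simp only [aScan, List.map_cons, scanV, h0, Option.bind_some, hget, Option.getD_some,
      PySem.Set.contains_iff]
    by_cases hc : r[a.toNat]'(by push_cast at hlen; omega) ∈ seen
    · simp [hc]
    · simp only [hc, if_false]
      have harr : a + 1 + (k : Int) = a + ((k + 1 : Nat) : Int) := by push_cast; omega
      have := ih (a + 1) (PySem.Set.add seen r[a.toNat]) (by omega) (by omega)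
      rw [harr] at this
      rw [this]

lemma bRow_range (r : List Int) (rest : List (List Int)) :
    ∀ (k : Nat) (a : Int), 0 ≤ a → a + k ≤ (r.length : Int) →
      bRow (r :: rest) k a
        = some ((PySem.List.pyRange a (a + k)).map (fun c => (PySem.List.pyGet? r c).getD 0)) := by
  intro k
  induction k with
  | zero =>
    intro a _ _
    rw [PySem.List.pyRange_one_eq_nil (by omega)]
    simp [bRow]
  | succ k ih =>
    intro a ha hlen
    have hcons := PySem.List.pyRange_one_cons (a := a) (b := a + (k + 1 : Nat)) (by push_cast; omega)
    rw [hcons]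
    have h0 : PySem.List.pyGet? (r :: rest) 0 = some r := by
      simp
    have hget : PySem.List.pyGet? r a = some (r[a.toNat]'(by push_cast at hlen; omega)) := by
      have := PySem.List.pyGet?_natCast r a.toNat
      rw [Int.toNat_of_nonneg ha] at this
      rw [this, List.getElem?_eq_getElem]
    simp only [bRow, List.map_cons, h0, Option.bind_some, hget]
    have harr : a + 1 + (k : Int) = a + ((k + 1 : Nat) : Int) := by push_cast; omega
    have := ih (a + 1) (by omega) (by omega)
    rw [harr] at this
    rw [this]
    simp

-- the abstract core: A's two loops on the cell values V agree with sorted(V) == range(1, m+1)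
lemma core (V : List Int) (m : Int) (hlen : (V.length : Int) = m) :
    (match (some (scanV V PySem.Set.empty) : Option (Bool × PySem.Set Int)) with
     | none => false
     | some (false, _) => false
     | some (true, seen) => aCheck seen (PySem.List.pyRange 1 (m + 1)))
      = (match (some V : Option (List Int)) with
         | none => false
         | some row => decide (PySem.List.sorted row (fun x => x) = PySem.List.pyRange 1 (m + 1))) := by
  show _ = decide (PySem.List.sorted V (fun x => x) = PySem.List.pyRange 1 (m + 1))
  set R := PySem.List.pyRange 1 (m + 1) with hR
  have hRnodup : R.Nodup := by rw [hR]; exact PySem.List.nodup_pyRange_one _ _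
  have hRlen : (R.length : Int) = m := by
    rw [hR, PySem.List.length_pyRange_one]; omega
  have hperm_iff : (PySem.List.sorted V (fun x => x) = R) ↔ R.Perm V := by
    constructor
    · intro h; rw [← h]; exact PySem.List.sorted_perm V (fun x => x) false
    · intro h
      exact PySem.List.sorted_eq_of_perm_of_pairwise_lt V R (fun x => x) h
        (by rw [hR]; exact PySem.List.pairwise_lt_pyRange_one _ _)
  rcases hsc : scanV V PySem.Set.empty with ⟨b, seen⟩
  cases b
  · -- duplicate found: V not nodup, so sorted V ≠ R
    simp only
    have hnotnodup : ¬ V.Nodup := by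
      intro hnd
      have : (scanV V PySem.Set.empty).1 = true :=
        (scanV_fst_true_iff V PySem.Set.empty).mpr ⟨hnd, by intro v _ hv; simp [PySem.Set.empty] at hv⟩
      rw [hsc] at this; simp at this
    have : ¬ (PySem.List.sorted V (fun x => x) = R) := by
      rw [hperm_iff]
      intro hp
      exact hnotnodup (hp.nodup hRnodup)
    simp [this]
  · -- no duplicate: V nodup, seen = elements of V
    simp only
    have hfst : (scanV V PySem.Set.empty).1 = true := by rw [hsc]
    have hnd : V.Nodup := ((scanV_fst_true_iff V PySem.Set.empty).mp hfst).1
    have hmem : ∀ x, x ∈ seen ↔ x ∈ V := by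
      intro x
      have := scanV_snd_mem V PySem.Set.empty hfst x
      rw [hsc] at this
      simpa [PySem.Set.empty] using this
    have hiff : (aCheck seen R = true) ↔ (PySem.List.sorted V (fun x => x) = R) := by
      rw [aCheck_true_iff, hperm_iff]
      constructor
      · intro hsub
        have hsubset : R ⊆ V := fun x hx => (hmem x).mp (hsub x hx)
        have hsp : R.Subperm V := hRnodup.subperm hsubset
        exact hsp.perm_of_length_le (by omega)
      · intro hp i hi
        exact (hmem i).mpr (hp.subset hi)
    rcases h : aCheck seen R with _ | _
    · have : ¬ (PySem.List.sorted V (fun x => x) = R) := by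
        rw [← hiff, h]; simp
      simp [this]
    · simp [hiff.mp h]

-- ===== VERDICT (by name: the statement is the Claim_ definition above) =====
theorem row_correct_spec : Claim_equal_row_correct := by
  intro sudoku n _ hpre
  unfold Spec_row_correct
  have hm0 : 0 ≤ n ^ 2 := by positivity
  rcases hpre with h0 | ⟨hne, hlen⟩
  · -- n^2 = 0: both ranges are empty
    rw [row_correct, row_correct_alt, h0]
    rw [PySem.List.pyRange_one_eq_nil (by omega)]
    have hs : PySem.List.sorted ([] : List Int) (fun x => x) = [] :=
      (PySem.List.sorted_eq_nil_iff _ _ _).mpr rfl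
    simp [aScan, aCheck, bRow, hs]
  · rcases sudoku with _ | ⟨r, rest⟩
    · exact absurd rfl hne
    · simp only [List.headI] at hlen
      set k := (n ^ 2).toNat with hk
      have hm : (k : Int) = n ^ 2 := Int.toNat_of_nonneg hm0
      rw [row_correct, row_correct_alt]
      have ha := aScan_range r rest k 0 PySem.Set.empty le_rfl (by omega)
      have hb := bRow_range r rest k 0 le_rfl (by omega)
      rw [show (0 : Int) + (k : Int) = n ^ 2 by omega] at ha hb
      rw [ha, hb]
      have hVlen : (((PySem.List.pyRange 0 (n ^ 2)).map
          (fun c => (PySem.List.pyGet? r c).getD 0)).length : Int) = n ^ 2 := by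
        rw [List.length_map, PySem.List.length_pyRange_one]; omega
      exact core _ (n ^ 2) hVlen
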